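-- pv_equiv track=rewrite | github.com/miskiewiczm/dna_bits | primer_cross.py | comparer
-- ===== SOURCE A (Python) =====
-- def comparer(primer1: str, primer2: str):
--     if not primer1 or not primer2:
--         return -1
--
--     primer2 = primer2[::-1]
--     p1_tab = '*' * (len(primer1 + primer2) - 2) + primer1
--     p2_tab = '*' * (len(primer1) - 1) + primer2
--     align = []
--
--     for i in range(len(primer1 + primer2) - 1):
--         common = list(zip(p1_tab[i:], p2_tab))
--         align.append(
--             common.count(("A", "T")) + common.count(("T", "A")) +
--             common.count(("C", "G")) + common.count(("G", "C"))
--         )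
--     return max(align)
-- ===== SOURCE B (Python) =====
-- _PAIRS = {('A', 'T'), ('T', 'A'), ('C', 'G'), ('G', 'C')}
--
--
-- def comparer(primer1: str, primer2: str):
--     if not primer1 or not primer2:
--         return -1
--     rev2 = primer2[::-1]
--     m = len(rev2)
--     # one pass over all character pairs, bucketed by alignment diagonal
--     counts = [0] * (len(primer1) + m - 1)
--     for a, c1 in enumerate(primer1):
--         for b, c2 in enumerate(rev2):
--             if (c1, c2) in _PAIRS:
--                 counts[m - 1 + a - b] += 1
--     return max(counts)
-- ===== Notes on version B (the rewrite author's own statement) =====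
-- stated objective: faster
-- what changed: Instead of padding both strings with '*' sentinels and, for every shift, slicing, zipping and making four full-length .count passes, B makes a single nested pass over the character pairs of primer1 and reversed primer2, bucketing each complementary pair into a per-diagonal counter array, and returns the max bucket.
import Mathlib
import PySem

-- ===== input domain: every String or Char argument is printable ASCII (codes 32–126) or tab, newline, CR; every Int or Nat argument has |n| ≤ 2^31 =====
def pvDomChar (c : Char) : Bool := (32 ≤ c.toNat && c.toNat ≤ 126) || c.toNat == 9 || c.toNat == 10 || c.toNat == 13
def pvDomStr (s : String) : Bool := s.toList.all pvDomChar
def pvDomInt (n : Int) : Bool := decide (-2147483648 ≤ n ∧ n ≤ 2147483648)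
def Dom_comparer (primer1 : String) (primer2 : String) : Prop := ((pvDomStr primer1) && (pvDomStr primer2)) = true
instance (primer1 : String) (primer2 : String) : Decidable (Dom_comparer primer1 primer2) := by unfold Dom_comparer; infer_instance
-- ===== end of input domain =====

-- B replaces A's '*'-padded per-shift rescans by one bucketed pass over all character
-- pairs (objective: faster; a timing run measures the speed-up).

-- ===== PORT A =====
-- literal transliteration of Source A: pad with '*', and for every shift i zip the padded
-- strings and add the four tuple counts; align ≠ [] whenever this branch runs
-- (n ≥ 1, m ≥ 1), so Python's max(align) is total and the .getD (-1) default is never used.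
def comparer (primer1 : String) (primer2 : String) : Int :=
  if primer1.toList.isEmpty || primer2.toList.isEmpty then -1
  else
    let p1 := primer1.toList
    let p2 := primer2.toList.reverse        -- primer2[::-1]  (PySem.List.slice?_none_none_neg_one)
    let p1_tab := List.replicate (p1.length + p2.length - 2) '*' ++ p1
    let p2_tab := List.replicate (p1.length - 1) '*' ++ p2
    let align := (List.range (p1.length + p2.length - 1)).map (fun i =>
      let common := (p1_tab.drop i).zip p2_tab      -- p1_tab[i:], i ≥ 0 (slice_from_natCast)
      ((common.count ('A','T') : Int) + (common.count ('T','A') : Int) +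
       (common.count ('C','G') : Int) + (common.count ('G','C') : Int)))
    (PySem.List.max? align (fun x => x)).getD (-1)

-- ===== PORT B =====
def pvPairs : List (Char × Char) := [('A','T'), ('T','A'), ('C','G'), ('G','C')]

-- literal transliteration of Source B: one nested pass over enumerate(primer1) × enumerate(rev2),
-- incrementing counts[m-1+a-b] for each complementary pair; that index always lies in
-- [0, n+m-2] = range(len(counts)), so counts[i] += 1 is exact via pySetD/pyGetD
-- (Raise.InRange holds); max(counts) is total here, so the .getD (-1) default is never used.
def comparer_alt (primer1 : String) (primer2 : String) : Int :=
  if primer1.toList.isEmpty || primer2.toList.isEmpty then -1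
  else
    let p1 := primer1.toList
    let rev2 := primer2.toList.reverse      -- primer2[::-1]
    let counts := (PySem.List.enumerate p1 0).foldl (fun cs ac =>
        (PySem.List.enumerate rev2 0).foldl (fun cs bc =>
          if pvPairs.contains (ac.2, bc.2) then
            PySem.List.pySetD cs ((rev2.length : Int) - 1 + ac.1 - bc.1)
              (PySem.List.pyGetD cs ((rev2.length : Int) - 1 + ac.1 - bc.1) 0 + 1)
          else cs) cs)
      (List.replicate (p1.length + rev2.length - 1) (0 : Int))
    (PySem.List.max? counts (fun x => x)).getD (-1)

-- ===== PRECONDITION & SPEC =====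
def Spec_comparer (primer1 : String) (primer2 : String) (out : Int) : Prop := out = comparer_alt primer1 primer2
instance (primer1 : String) (primer2 : String) (out : Int) : Decidable (Spec_comparer primer1 primer2 out) := by unfold Spec_comparer; infer_instance

-- ===== CLAIM (what is proved, stated in full; the proofs are below) =====
def Claim_equal_comparer : Prop := ∀ (primer1 : String) (primer2 : String), Dom_comparer primer1 primer2 → Spec_comparer primer1 primer2 (comparer primer1 primer2)

-- ===== LEMMAS AND PROOFS =====

-- the complementarity test as a Bool predicate on two chars
def pvF (c d : Char) : Bool := pvPairs.contains (c, d)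

-- all (row, column) pairs visited by B's nested loop, flattened
def pvPairList (P Q : List Char) : List ((Int × Char) × (Int × Char)) :=
  (PySem.List.enumerate P 0).flatMap (fun ac => (PySem.List.enumerate Q 0).map (fun bc => (ac, bc)))

theorem pv_ind (c d : Char) :
    ((if ((c,d) == ('A','T')) then (1:Nat) else 0) + (if ((c,d) == ('T','A')) then 1 else 0)
     + (if ((c,d) == ('C','G')) then 1 else 0) + (if ((c,d) == ('G','C')) then 1 else 0))
      = if pvF c d then 1 else 0 := by
  by_cases hA : c = 'A' ∧ d = 'T'
  · obtain ⟨rfl, rfl⟩ := hA; decide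
  · by_cases hT : c = 'T' ∧ d = 'A'
    · obtain ⟨rfl, rfl⟩ := hT; decide
    · by_cases hC : c = 'C' ∧ d = 'G'
      · obtain ⟨rfl, rfl⟩ := hC; decide
      · by_cases hG : c = 'G' ∧ d = 'C'
        · obtain ⟨rfl, rfl⟩ := hG; decide
        · have h1 : ((c,d) == ('A','T')) = false := by
            simpa [Prod.mk.injEq] using hA
          have h2 : ((c,d) == ('T','A')) = false := by
            simpa [Prod.mk.injEq] using hT
          have h3 : ((c,d) == ('C','G')) = false := by
            simpa [Prod.mk.injEq] using hC
          have h4 : ((c,d) == ('G','C')) = false := by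
            simpa [Prod.mk.injEq] using hG
          simp [pvF, pvPairs, h1, h2, h3, h4]; tauto

theorem pv_count4 (l : List (Char × Char)) :
    l.count ('A','T') + l.count ('T','A') + l.count ('C','G') + l.count ('G','C')
      = l.countP (fun p => pvF p.1 p.2) := by
  induction l with
  | nil => simp
  | cons p l ih =>
    obtain ⟨c, d⟩ := p
    simp only [List.count_cons, List.countP_cons]
    rw [← pv_ind c d]
    omega

theorem pvF_star_left (d : Char) : pvF '*' d = false := by simp [pvF, pvPairs]

theorem pvF_star_right (c : Char) : pvF c '*' = false := by simp [pvF, pvPairs]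

theorem pv_cpL (k : Nat) (v : List Char) :
    ((List.replicate k '*').zip v).countP (fun p => pvF p.1 p.2) = 0 := by
  induction k generalizing v with
  | zero => simp
  | succ k ih =>
    cases v with
    | nil => simp
    | cons c v => simp [List.replicate_succ, pvF_star_left, ih]

theorem pv_cpR (u : List Char) (k : Nat) :
    (u.zip (List.replicate k '*')).countP (fun p => pvF p.1 p.2) = 0 := by
  induction u generalizing k with
  | nil => simp
  | cons c u ih =>
    cases k with
    | zero => simp
    | succ k => simp [List.replicate_succ, pvF_star_right, ih]

theorem pv_peel (P Q : List Char) (j : Nat) (hP : 1 ≤ P.length) (hQ : 1 ≤ Q.length)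
    (hj : j < P.length + Q.length - 1) :
    (((List.replicate (P.length + Q.length - 2) '*' ++ P).drop j).zip
        (List.replicate (P.length - 1) '*' ++ Q)).countP (fun p => pvF p.1 p.2)
      = if j < Q.length then
          (P.zip (Q.drop (Q.length - 1 - j))).countP (fun p => pvF p.1 p.2)
        else
          ((P.drop (j - (Q.length - 1))).zip Q).countP (fun p => pvF p.1 p.2) := by
  have hdrop : (List.replicate (P.length + Q.length - 2) '*' ++ P).drop j
      = List.replicate (P.length + Q.length - 2 - j) '*' ++ P := by
    rw [List.drop_append_of_le_length (by simp; omega), List.drop_replicate]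
  rw [hdrop]
  by_cases hcase : j < Q.length
  · rw [if_pos hcase]
    set d := Q.length - 1 - j with hd
    have hsplit : P.length + Q.length - 2 - j = (P.length - 1) + d := by omega
    rw [hsplit, List.replicate_add, List.append_assoc,
        List.zip_append (by simp),
        List.countP_append, pv_cpL]
    have hQsplit : Q = Q.take d ++ Q.drop d := (List.take_append_drop d Q).symm
    conv_lhs => rw [hQsplit]
    rw [List.zip_append (by simp; omega), List.countP_append, pv_cpL]
    simp
  · rw [if_neg hcase]
    set e := j - (Q.length - 1) with he
    have hsplit : P.length - 1 = (P.length + Q.length - 2 - j) + e := by omega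
    rw [hsplit, List.replicate_add, List.append_assoc,
        List.zip_append (by simp),
        List.countP_append, pv_cpL]
    have hPsplit : P = P.take e ++ P.drop e := (List.take_append_drop e P).symm
    conv_lhs => rw [hPsplit]
    rw [List.zip_append (by simp; omega), List.countP_append, pv_cpR]
    simp

theorem pv_inner (g : Char → Bool) (t j : Int) :
    ∀ (q : List Char) (s : Int),
      (PySem.List.enumerate q s).countP (fun bc => g bc.2 && (t - bc.1 == j))
        = if 0 ≤ t - j - s ∧ t - j - s < q.length ∧ g (q.getD (t - j - s).toNat '?') = true
          then 1 else 0 := by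
  intro q
  induction q with
  | nil =>
    intro s
    rw [if_neg]
    · simp [PySem.List.enumerate]
    · rintro ⟨h1, h2, -⟩; simp at h2; omega
  | cons c q ih =>
    intro s
    rw [PySem.List.enumerate_cons, List.countP_cons, ih (s+1)]
    by_cases hcond : 0 ≤ t - j - s ∧ t - j - s < ((c :: q).length : Int) ∧
        g ((c :: q).getD (t - j - s).toNat '?') = true
    · rw [if_pos hcond]
      obtain ⟨u1, u2, u3⟩ := hcond
      by_cases hs : t - j = s
      · have hb : (t - s == j) = true := by simp; omega
        have h0 : (t - j - s).toNat = 0 := by omega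
        rw [h0] at u3; simp at u3
        rw [if_neg (by rintro ⟨v1, -, -⟩; omega)]
        simp [hb, u3]
      · have e1 : (t - j - s).toNat = (t - j - (s+1)).toNat + 1 := by omega
        rw [e1] at u3; simp at u3
        have hb : (t - s == j) = false := by simp; omega
        rw [if_pos ⟨by omega, by simp at u2 ⊢; omega, u3⟩]
        simp [hb]
    · rw [if_neg hcond]
      by_cases hs : t - j = s
      · have hb : (t - s == j) = true := by simp; omega
        have h0 : (t - j - s).toNat = 0 := by omega
        have u3 : g c = false := by
          rcases Bool.eq_false_or_eq_true (g c) with h | h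
          · exact absurd ⟨by omega, by simp; omega, by rw [h0]; simpa using h⟩ hcond
          · exact h
        rw [if_neg (by rintro ⟨v1, -, -⟩; omega)]
        simp [hb, u3]
      · have hb : (t - s == j) = false := by simp; omega
        rw [if_neg]
        · simp [hb]
        · rintro ⟨v1, v2, v3⟩
          have e1 : (t - j - s).toNat = (t - j - (s+1)).toNat + 1 := by omega
          exact hcond ⟨by omega, by simp at v2 ⊢; omega, by rw [e1]; simpa using v3⟩

theorem pv_zipdrop (g : Char → Char → Bool) (q : List Char) (c : Char) (u : List Char) (t : Nat) :
    ((c :: u).zip (q.drop t)).countP (fun p => g p.1 p.2)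
      = (if t < q.length ∧ g c (q.getD t '?') = true then 1 else 0)
        + (u.zip (q.drop (t+1))).countP (fun p => g p.1 p.2) := by
  by_cases ht : t < q.length
  · have hdrop : q.drop t = q[t] :: q.drop (t+1) := by
      rw [List.drop_eq_getElem_cons ht]
    rw [hdrop]
    simp only [List.zip_cons_cons, List.countP_cons]
    have hget : q.getD t '?' = q[t] := List.getD_eq_getElem _ _ ht
    cases hg : g c q[t] with
    | true =>
      have hc : t < q.length ∧ g c (q.getD t '?') = true := ⟨ht, by rw [hget]; exact hg⟩
      rw [if_pos hc]; simp; omega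
    | false =>
      have hc : ¬(t < q.length ∧ g c (q.getD t '?') = true) := by
        rintro ⟨-, u3⟩; rw [hget, hg] at u3; simp at u3
      rw [if_neg hc]
      simp
  · have h1 : q.drop t = [] := List.drop_eq_nil_of_le (by omega)
    have h2 : q.drop (t+1) = [] := List.drop_eq_nil_of_le (by omega)
    rw [h1, h2, if_neg (by rintro ⟨h, -⟩; omega)]
    simp

theorem pv_rowsum1 (g : Char → Char → Bool) (q : List Char) (d : Nat) :
    ∀ (u : List Char) (s : Nat),
      ((u.zipIdx s).map (fun ck =>
          if ck.2 + d < q.length ∧ g ck.1 (q.getD (ck.2 + d) '?') = true then (1 : Nat) else 0)).sum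
        = (u.zip (q.drop (s + d))).countP (fun p => g p.1 p.2) := by
  intro u
  induction u with
  | nil => intro s; simp
  | cons c u ih =>
    intro s
    rw [List.zipIdx_cons, List.map_cons, List.sum_cons, ih (s+1), pv_zipdrop]
    have : s + 1 + d = s + d + 1 := by omega
    rw [this]

theorem pv_rowsum2 (g : Char → Char → Bool) (q : List Char) (e : Nat) :
    ∀ (u : List Char) (s : Nat),
      ((u.zipIdx s).map (fun ck =>
          if e ≤ ck.2 ∧ ck.2 - e < q.length ∧ g ck.1 (q.getD (ck.2 - e) '?') = true then (1 : Nat) else 0)).sum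
        = ((u.drop (e - s)).zip (q.drop (s - e))).countP (fun p => g p.1 p.2) := by
  intro u
  induction u with
  | nil => intro s; simp
  | cons c u ih =>
    intro s
    rw [List.zipIdx_cons, List.map_cons, List.sum_cons, ih (s+1)]
    by_cases hs : e ≤ s
    · have h1 : e - s = 0 := by omega
      have h2 : e - (s+1) = 0 := by omega
      have h3 : s + 1 - e = (s - e) + 1 := by omega
      rw [h1, h2, h3, List.drop_zero, List.drop_zero, pv_zipdrop]
      have hcong : (if e ≤ s ∧ s - e < q.length ∧ g c (q.getD (s - e) '?') = true then (1:Nat) else 0)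
          = if s - e < q.length ∧ g c (q.getD (s - e) '?') = true then 1 else 0 := by
        by_cases h : s - e < q.length ∧ g c (q.getD (s - e) '?') = true
        · rw [if_pos h, if_pos ⟨hs, h⟩]
        · rw [if_neg h, if_neg (by rintro ⟨-, h2⟩; exact h h2)]
      rw [hcong]
    · have h1 : e - s = (e - (s+1)) + 1 := by omega
      have h2 : s - e = 0 := by omega
      have h3 : s + 1 - e = 0 := by omega
      rw [if_neg (by rintro ⟨h, -⟩; omega), h1, h2, h3, List.drop_succ_cons]
      omega

theorem pv_fold {X : Type} (P : X → Bool) (idx : X → Int) :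
    ∀ (l : List X) (cs : List Int),
      (∀ x ∈ l, 0 ≤ idx x ∧ (idx x).toNat < cs.length) →
      ∀ j : Nat,
        (l.foldl (fun cs x => if P x then
            PySem.List.pySetD cs (idx x) (PySem.List.pyGetD cs (idx x) 0 + 1) else cs) cs)[j]?
          = cs[j]?.map (fun v => v + (l.countP (fun x => P x && (idx x == (j : Int))) : Int)) := by
  intro l
  induction l with
  | nil => intro cs _ j; cases h : cs[j]? <;> simp [h]
  | cons x l ih =>
    intro cs hrange j
    obtain ⟨hx0, hxlt⟩ := hrange x (by simp)
    rw [List.foldl_cons, List.countP_cons]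
    by_cases hp : P x = true
    · rw [if_pos hp]
      have hset : PySem.List.pySetD cs (idx x) (PySem.List.pyGetD cs (idx x) 0 + 1)
          = cs.set (idx x).toNat (cs[(idx x).toNat] + 1) := by
        rw [PySem.List.pySetD_of_nonneg _ _ hx0,
            PySem.List.pyGetD_eq_getElem _ _ hx0 (by omega)]
      rw [hset, ih _ (fun y hy => by
        have := hrange y (by simp [hy]); simpa using this)]
      by_cases hj : (idx x).toNat = j
      · have hbeq : (idx x == (j : Int)) = true := by simp; omega
        subst hj
        rw [List.getElem?_set_self (by simpa using hxlt)]
        rw [List.getElem?_eq_getElem hxlt]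
        simp [hp]
        rw [if_pos hx0]; ring
      · have hbeq : (idx x == (j : Int)) = false := by simp; omega
        rw [List.getElem?_set_ne (by omega)]
        simp [hbeq, hp]
    · rw [if_neg hp]
      rw [ih _ (fun y hy => hrange y (by simp [hy]))]
      simp [hp]

theorem pv_flatten (P Q : List Char) (cs : List Int) (m1 : Int) :
    (PySem.List.enumerate P 0).foldl (fun cs ac =>
        (PySem.List.enumerate Q 0).foldl (fun cs bc =>
          if pvPairs.contains (ac.2, bc.2) then
            PySem.List.pySetD cs (m1 + ac.1 - bc.1)
              (PySem.List.pyGetD cs (m1 + ac.1 - bc.1) 0 + 1)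
          else cs) cs) cs
      = (pvPairList P Q).foldl (fun cs x =>
          if pvPairs.contains (x.1.2, x.2.2) then
            PySem.List.pySetD cs (m1 + x.1.1 - x.2.1)
              (PySem.List.pyGetD cs (m1 + x.1.1 - x.2.1) 0 + 1)
          else cs) cs := by
  rw [pvPairList, List.foldl_flatMap]
  simp only [List.foldl_map]

theorem pv_mem_pairList (P Q : List Char) (x : (Int × Char) × (Int × Char))
    (hx : x ∈ pvPairList P Q) :
    (0 ≤ x.1.1 ∧ x.1.1 < P.length) ∧ (0 ≤ x.2.1 ∧ x.2.1 < Q.length) := by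
  rw [pvPairList, List.mem_flatMap] at hx
  obtain ⟨ac, hac, hmem⟩ := hx
  rw [List.mem_map] at hmem
  obtain ⟨bc, hbc, rfl⟩ := hmem
  rw [PySem.List.mem_enumerate_iff] at hac hbc
  obtain ⟨k, hk, rfl⟩ := hac
  obtain ⟨l, hl, rfl⟩ := hbc
  constructor <;> constructor <;> simp <;> omega

theorem pv_countP_flatMap {α β : Type} (l : List α) (g : α → List β) (p : β → Bool) :
    (l.flatMap g).countP p = (l.map (fun a => (g a).countP p)).sum := by
  induction l with
  | nil => simp
  | cons a l ih => simp [List.flatMap_cons, List.countP_append, ih]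

theorem pv_Ncount (P Q : List Char) (j : Nat) (hQ : 1 ≤ Q.length) :
    ((pvPairList P Q).countP (fun x => pvPairs.contains (x.1.2, x.2.2) &&
        (((Q.length : Int) - 1) + x.1.1 - x.2.1 == (j : Int))))
      = if j < Q.length then (P.zip (Q.drop (Q.length - 1 - j))).countP (fun p => pvF p.1 p.2)
        else ((P.drop (j - (Q.length - 1))).zip Q).countP (fun p => pvF p.1 p.2) := by
  rw [pvPairList, pv_countP_flatMap]
  simp only [List.countP_map, Function.comp_def]
  have h1 := List.map_congr_left (l := PySem.List.enumerate P 0)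
    (f := fun ac => List.countP (fun bc => pvPairs.contains (ac.2, bc.2) &&
        (((Q.length : Int) - 1) + ac.1 - bc.1 == (j:Int))) (PySem.List.enumerate Q 0))
    (g := fun ac => if 0 ≤ ((Q.length : Int) - 1) + ac.1 - j - 0 ∧
        ((Q.length : Int) - 1) + ac.1 - j - 0 < Q.length ∧
        pvPairs.contains (ac.2, Q.getD (((Q.length : Int) - 1) + ac.1 - j - 0).toNat '?') = true
        then 1 else 0)
    (fun ac _ => pv_inner (fun c2 => pvPairs.contains (ac.2, c2)) (((Q.length : Int) - 1) + ac.1) j Q 0)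
  rw [h1, PySem.List.enumerate_eq_zipIdx_map, List.map_map]
  by_cases hcase : j < Q.length
  · have r1 := pv_rowsum1 (fun c1 c2 => pvF c1 c2) Q (Q.length - 1 - j) P 0
    rw [Nat.zero_add] at r1
    rw [if_pos hcase, ← r1]
    congr 1
    refine List.map_congr_left (fun ck _ => ?_)
    obtain ⟨c, k⟩ := ck
    simp only [Function.comp_def]
    have htn : (((Q.length : Int) - 1) + ((0 : Int) + (k : Int)) - (j : Int) - 0).toNat
        = k + (Q.length - 1 - j) := by omega
    rw [htn]
    by_cases hk : k + (Q.length - 1 - j) < Q.length ∧ pvF c (Q.getD (k + (Q.length - 1 - j)) '?') = true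
    · rw [if_pos hk, if_pos ⟨by omega, by omega, by simpa [pvF] using hk.2⟩]
    · rw [if_neg hk, if_neg]
      rintro ⟨-, h2, h3⟩
      exact hk ⟨by omega, by simpa [pvF] using h3⟩
  · have r2 := pv_rowsum2 (fun c1 c2 => pvF c1 c2) Q (j - (Q.length - 1)) P 0
    rw [Nat.sub_zero, Nat.zero_sub, List.drop_zero] at r2
    rw [if_neg hcase, ← r2]
    congr 1
    refine List.map_congr_left (fun ck _ => ?_)
    obtain ⟨c, k⟩ := ck
    simp only [Function.comp_def]
    by_cases hk : j - (Q.length - 1) ≤ k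
    · have htn : (((Q.length : Int) - 1) + ((0 : Int) + (k : Int)) - (j : Int) - 0).toNat
          = k - (j - (Q.length - 1)) := by omega
      rw [htn]
      by_cases hk2 : k - (j - (Q.length - 1)) < Q.length ∧ pvF c (Q.getD (k - (j - (Q.length - 1))) '?') = true
      · rw [if_pos ⟨by omega, by omega, by simpa [pvF] using hk2.2⟩,
            if_pos ⟨hk, hk2⟩]
      · rw [if_neg (α := ℕ)
              (by rintro ⟨-, h2, h3⟩
                  exact hk2 ⟨by omega, by simpa [pvF] using h3⟩),
            if_neg (by rintro ⟨-, u⟩; exact hk2 u)]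
    · rw [if_neg (α := ℕ) (by rintro ⟨h1', -, -⟩; omega : ¬(0 ≤ ((Q.length : Int) - 1) + ((0 : Int) + (k : Int)) - (j : Int) - 0 ∧ ((Q.length : Int) - 1) + ((0 : Int) + (k : Int)) - (j : Int) - 0 < (Q.length : Int) ∧ pvPairs.contains (c, Q.getD (((Q.length : Int) - 1) + ((0 : Int) + (k : Int)) - (j : Int) - 0).toNat '?') = true))]
      rw [if_neg (by rintro ⟨u, -⟩; exact hk u)]

theorem pv_main (P Q : List Char) (hP : 1 ≤ P.length) (hQ : 1 ≤ Q.length) :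
    (List.range (P.length + Q.length - 1)).map (fun i =>
        let common := ((List.replicate (P.length + Q.length - 2) '*' ++ P).drop i).zip
          (List.replicate (P.length - 1) '*' ++ Q)
        ((common.count ('A','T') : Int) + (common.count ('T','A') : Int) +
         (common.count ('C','G') : Int) + (common.count ('G','C') : Int)))
      = (PySem.List.enumerate P 0).foldl (fun cs ac =>
          (PySem.List.enumerate Q 0).foldl (fun cs bc =>
            if pvPairs.contains (ac.2, bc.2) then
              PySem.List.pySetD cs ((Q.length : Int) - 1 + ac.1 - bc.1)
                (PySem.List.pyGetD cs ((Q.length : Int) - 1 + ac.1 - bc.1) 0 + 1)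
            else cs) cs)
        (List.replicate (P.length + Q.length - 1) (0 : Int)) := by
  rw [pv_flatten]
  apply List.ext_getElem?
  intro j
  rw [pv_fold (fun x => pvPairs.contains (x.1.2, x.2.2))
      (fun x => (Q.length : Int) - 1 + x.1.1 - x.2.1) (pvPairList P Q)
      (List.replicate (P.length + Q.length - 1) (0 : Int))
      (fun x hx => by
        have h := pv_mem_pairList P Q x hx
        constructor
        · show (0:Int) ≤ (Q.length : Int) - 1 + x.1.1 - x.2.1
          omega
        · show ((Q.length : Int) - 1 + x.1.1 - x.2.1).toNat < _
          rw [List.length_replicate]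
          omega) j]
  by_cases hj : j < P.length + Q.length - 1
  · rw [List.getElem?_map, List.getElem?_range hj,
        List.getElem?_eq_getElem (by rw [List.length_replicate]; exact hj),
        List.getElem_replicate]
    simp only [Option.map_some]
    congr 1
    rw [← Nat.cast_add, ← Nat.cast_add, ← Nat.cast_add, pv_count4,
        pv_peel P Q j hP hQ hj, pv_Ncount P Q j hQ, zero_add]
  · rw [List.getElem?_eq_none (by simp; omega),
        List.getElem?_eq_none (by simp; omega)]
    simp

-- ===== VERDICT (by name: the statement is the Claim_ definition above) =====
theorem comparer_spec : Claim_equal_comparer := by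
  intro primer1 primer2 _
  unfold Spec_comparer comparer comparer_alt
  by_cases h1 : primer1.toList.isEmpty
  · simp [h1]
  · by_cases h2 : primer2.toList.isEmpty
    · simp [h1, h2]
    · have hP : 1 ≤ primer1.toList.length := by
        rcases Nat.eq_zero_or_pos primer1.toList.length with h | h
        · exact absurd (List.isEmpty_iff.mpr (List.eq_nil_of_length_eq_zero h)) h1
        · exact h
      have hQ : 1 ≤ primer2.toList.reverse.length := by
        rw [List.length_reverse]
        rcases Nat.eq_zero_or_pos primer2.toList.length with h | h
        · exact absurd (List.isEmpty_iff.mpr (List.eq_nil_of_length_eq_zero h)) h2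
        · exact h
      simp only [h1, h2, Bool.or_false, Bool.false_eq_true, if_neg, not_false_iff]
      rw [pv_main primer1.toList primer2.toList.reverse hP hQ]
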